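-- pv_equiv track=rewrite | github.com/stradivari96/leetcode | amazon/chemical_delivery.py | choose_flask
-- ===== SOURCE A (Python) =====
-- def choose_flask(requirements, markings):
--     flasks = {}
--
--     def calculate_loss(f):
--         loss = 0
--         for req in requirements:
--             if req > flasks[f][-1]:
--                 return float("inf")
--             else:
--                 loss += min([m for m in flasks[f] if m >= req]) - req
--         return loss
--
--     for f, mark in markings:
--         if f not in flasks:
--             flasks[f] = [mark]
--         else:
--             flasks[f].append(mark)
--     best_flask = 0
--     best_loss = float("inf")
--     for f, marks in flasks.items():
--         loss = calculate_loss(f)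
--         if loss < best_loss:
--             best_flask = f
--             best_loss = loss
--     return best_flask
-- ===== SOURCE B (Python) =====
-- def choose_flask(requirements, markings):
--     # Group the marks per flask, then sort each flask's marks ONCE and answer every
--     # requirement with a binary search (smallest mark >= req) instead of scanning and
--     # min-ing the whole mark list per requirement.  marks[-1] (the flask's last-listed,
--     # i.e. top, marking) is the capacity cutoff, as in A.
--     flasks = {}
--     for f, mark in markings:
--         flasks.setdefault(f, []).append(mark)
--     best_flask = 0
--     best_loss = None  # None = no feasible flask yet
--     for f, marks in flasks.items():
--         cap = marks[-1]
--         s = sorted(marks)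
--         loss = 0
--         for req in requirements:
--             if req > cap:
--                 loss = None
--                 break
--             lo, hi = 0, len(s)
--             while lo < hi:
--                 mid = (lo + hi) // 2
--                 if s[mid] < req:
--                     lo = mid + 1
--                 else:
--                     hi = mid
--             loss += s[lo] - req
--         if loss is not None and (best_loss is None or loss < best_loss):
--             best_flask = f
--             best_loss = loss
--     return best_flask
-- ===== Notes on version B (the rewrite author's own statement) =====
-- stated objective: alternative
-- what changed: B groups the marks once, sorts each flask's mark list once and answers each requirement with a binary search for the smallest mark >= req, instead of A's per-requirement scan that filters the whole mark list and takes its min.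
import Mathlib
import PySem

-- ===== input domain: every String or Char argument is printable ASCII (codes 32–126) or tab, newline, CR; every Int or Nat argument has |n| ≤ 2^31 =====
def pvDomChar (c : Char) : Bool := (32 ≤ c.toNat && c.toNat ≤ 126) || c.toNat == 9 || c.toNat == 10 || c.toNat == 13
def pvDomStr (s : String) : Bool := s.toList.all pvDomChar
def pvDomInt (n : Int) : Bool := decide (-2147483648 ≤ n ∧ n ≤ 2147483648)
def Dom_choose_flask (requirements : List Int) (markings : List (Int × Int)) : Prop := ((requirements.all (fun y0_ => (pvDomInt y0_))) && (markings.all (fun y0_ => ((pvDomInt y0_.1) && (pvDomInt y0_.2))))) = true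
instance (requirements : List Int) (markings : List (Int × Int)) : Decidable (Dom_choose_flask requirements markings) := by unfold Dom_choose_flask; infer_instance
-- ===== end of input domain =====

-- B sorts each flask's marks once and binary-searches the smallest mark ≥ req,
-- instead of A's per-requirement filter-and-min scan over the whole mark list.

-- ===== PORT A =====
-- `for f, mark in markings: if f not in flasks: flasks[f] = [mark] else: flasks[f].append(mark)`
def pvBuildFlasksA (markings : List (Int × Int)) : PySem.Dict Int (List Int) :=
  markings.foldl (fun d p =>
    if d.contains p.1 then d.modify p.1 [] (fun l => l ++ [p.2])
    else d.insert p.1 [p.2]) PySem.Dict.empty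

-- `calculate_loss`, with float("inf") represented as `none`; the loop over
-- `requirements` with its early `return` is the structural recursion below.
-- (`flasks[f][-1]` and `min(...)` are total here via defaults that are only
-- reached on an empty mark list, which the dict never stores.)
def pvCalcLossA (marks : List Int) : List Int → Int → Option Int
  | [], loss => some loss
  | req :: rest, loss =>
    if PySem.List.pyGetD marks (-1) 0 < req then none
    else pvCalcLossA marks rest
      (loss + ((PySem.List.min? (marks.filter (fun m => decide (req ≤ m))) (fun x => x)).getD 0 - req))

-- `loss < best_loss` on int-or-inf values (none = float("inf"))
def pvLtInf (a b : Option Int) : Bool :=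
  match a, b with
  | some x, some y => decide (x < y)
  | some _, none => true
  | none, _ => false

def choose_flask (requirements : List Int) (markings : List (Int × Int)) : Int :=
  let flasks := pvBuildFlasksA markings
  (flasks.items.foldl (fun st fm =>
      let loss := pvCalcLossA (flasks.getD fm.1 []) requirements 0
      if pvLtInf loss st.2 then (fm.1, loss) else st)
    ((0 : Int), (none : Option Int))).1

-- ===== PORT B =====
-- `flasks.setdefault(f, []).append(mark)`
def pvGroupMarksB (markings : List (Int × Int)) : PySem.Dict Int (List Int) :=
  markings.foldl (fun d p =>
    (d.setdefault p.1 []).modify p.1 [] (fun l => l ++ [p.2])) PySem.Dict.empty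

-- the hand-written `while lo < hi` binary-search loop of Source B
def pvBisect (s : List Int) (req : Int) (lo hi : Nat) : Nat :=
  if h : lo < hi then
    if s.getD ((lo + hi) / 2) 0 < req then pvBisect s req ((lo + hi) / 2 + 1) hi
    else pvBisect s req lo ((lo + hi) / 2)
  else lo
termination_by hi - lo
decreasing_by all_goals omega

-- the `for req in requirements` loop of Source B (loss = None = `none`; break = stop)
def pvLossB (s : List Int) (cap : Int) : List Int → Int → Option Int
  | [], loss => some loss
  | req :: rest, loss =>
    if cap < req then none
    else pvLossB s cap rest
      (loss + (PySem.List.pyGetD s ((pvBisect s req 0 s.length : Nat) : Int) 0 - req))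

def choose_flask_alt (requirements : List Int) (markings : List (Int × Int)) : Int :=
  let flasks := pvGroupMarksB markings
  (flasks.items.foldl (fun st fm =>
      let loss := pvLossB (PySem.List.sorted fm.2 (fun x => x) false)
                          (PySem.List.pyGetD fm.2 (-1) 0) requirements 0
      match loss with
      | none => st
      | some l =>
        if (match st.2 with | none => true | some b => decide (l < b)) then (fm.1, some l) else st)
    ((0 : Int), (none : Option Int))).1

-- ===== PRECONDITION & SPEC =====
def Spec_choose_flask (requirements : List Int) (markings : List (Int × Int)) (out : Int) : Prop := out = choose_flask_alt requirements markings
instance (requirements : List Int) (markings : List (Int × Int)) (out : Int) : Decidable (Spec_choose_flask requirements markings out) := by unfold Spec_choose_flask; infer_instance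

-- ===== CLAIM (what is proved, stated in full; the proofs are below) =====
def Claim_equal_choose_flask : Prop := ∀ (requirements : List Int) (markings : List (Int × Int)), Dom_choose_flask requirements markings → Spec_choose_flask requirements markings (choose_flask requirements markings)

-- ===== LEMMAS AND PROOFS =====

-- the two grouping loops build the same dict
theorem pvGroup_eq (markings : List (Int × Int)) :
    pvGroupMarksB markings = pvBuildFlasksA markings := by
  unfold pvGroupMarksB pvBuildFlasksA
  refine PySem.List.foldl_congr_mem _ _ _ _ ?_
  intro d p _
  by_cases h : d.contains p.1
  · rw [PySem.Dict.setdefault_of_contains d [] h, if_pos h]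
  · rw [PySem.Dict.setdefault_of_not_contains d [] (by simpa using h), if_neg h]
    simp [PySem.Dict.modify, PySem.Dict.insert_insert_self, PySem.Dict.getD_insert_self]

theorem pvBuild_aux_nodup (l : List (Int × Int)) :
    ∀ (d : PySem.Dict Int (List Int)), d.keys.Nodup →
      (l.foldl (fun d p =>
        if d.contains p.1 then d.modify p.1 [] (fun l => l ++ [p.2])
        else d.insert p.1 [p.2]) d).keys.Nodup := by
  induction l with
  | nil => intro d hd; simpa using hd
  | cons p t ih =>
    intro d hd
    simp only [List.foldl_cons]
    apply ih
    by_cases h : d.contains p.1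
    · rw [if_pos h]; exact PySem.Dict.nodup_keys_insert _ _ _ hd
    · rw [if_neg h]; exact PySem.Dict.nodup_keys_insert _ _ _ hd

theorem pvBuild_nodup (markings : List (Int × Int)) :
    (pvBuildFlasksA markings).keys.Nodup := by
  unfold pvBuildFlasksA
  exact pvBuild_aux_nodup _ _ (by simp [PySem.Dict.keys_empty])

theorem pvBuild_aux_ne_nil (l : List (Int × Int)) :
    ∀ (d : PySem.Dict Int (List Int)), (∀ q ∈ d.items, q.2 ≠ []) →
      ∀ q ∈ (l.foldl (fun d p =>
        if d.contains p.1 then d.modify p.1 [] (fun l => l ++ [p.2])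
        else d.insert p.1 [p.2]) d).items, q.2 ≠ [] := by
  induction l with
  | nil => intro d hd; simpa using hd
  | cons p t ih =>
    intro d hd
    simp only [List.foldl_cons]
    apply ih
    intro q hq
    by_cases h : d.contains p.1
    · rw [if_pos h] at hq
      unfold PySem.Dict.modify at hq
      rcases (PySem.Dict.mem_items_insert _ _ _ _).1 hq with h1 | h2
      · subst h1; simp
      · exact hd q h2.1
    · rw [if_neg h] at hq
      rcases (PySem.Dict.mem_items_insert _ _ _ _).1 hq with h1 | h2
      · subst h1; simp
      · exact hd q h2.1

theorem pvBuild_ne_nil (markings : List (Int × Int)) :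
    ∀ q ∈ (pvBuildFlasksA markings).items, q.2 ≠ [] := by
  unfold pvBuildFlasksA
  exact pvBuild_aux_ne_nil _ _ (by intro q hq; simp [PySem.Dict.empty] at hq)

-- a ≤-pairwise list is monotone by index
theorem pvPairwise_mono (s : List Int) (hs : s.Pairwise (fun a b : Int => a ≤ b)) :
    ∀ (p q : Nat) (hq : q < s.length) (hpq : p ≤ q), s[p]'(by omega) ≤ s[q] := by
  intro p q hq hpq
  rcases Nat.lt_or_ge p q with h | h
  · exact (List.pairwise_iff_getElem.1 hs) p q (by omega) hq h
  · have : p = q := by omega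
    subst this; exact le_refl _

-- binary-search invariant
theorem pvBisect_spec (n : Nat) (s : List Int) (req : Int)
    (hs : s.Pairwise (fun a b => a ≤ b)) :
    ∀ lo hi, hi - lo ≤ n → lo ≤ hi → hi ≤ s.length →
      (∀ j (hj : j < s.length), j < lo → s[j] < req) →
      (∀ j (hj : j < s.length), hi ≤ j → req ≤ s[j]) →
      lo ≤ pvBisect s req lo hi ∧ pvBisect s req lo hi ≤ hi ∧
      (∀ j (hj : j < s.length), j < pvBisect s req lo hi → s[j] < req) ∧
      (∀ j (hj : j < s.length), pvBisect s req lo hi ≤ j → req ≤ s[j]) := by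
  have mono := pvPairwise_mono s hs
  induction n with
  | zero =>
    intro lo hi hn hlh hhl hlo hhi
    have : lo = hi := by omega
    subst this
    rw [pvBisect, dif_neg (by omega)]
    exact ⟨le_refl _, le_refl _, hlo, hhi⟩
  | succ n ih =>
    intro lo hi hn hlh hhl hlo hhi
    rw [pvBisect]
    by_cases h : lo < hi
    · rw [dif_pos h]
      have hmid : (lo + hi) / 2 < s.length := by omega
      have hgd : s.getD ((lo + hi) / 2) 0 = s[(lo + hi) / 2] :=
        List.getD_eq_getElem s 0 hmid
      by_cases hc : s.getD ((lo + hi) / 2) 0 < req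
      · rw [if_pos hc]
        rw [hgd] at hc
        have := ih ((lo + hi) / 2 + 1) hi (by omega) (by omega) hhl
          (fun j hj hjlt => by
            rcases Nat.lt_or_ge j lo with h1 | h1
            · exact hlo j hj h1
            · exact lt_of_le_of_lt (mono j ((lo + hi) / 2) hmid (by omega)) hc)
          hhi
        exact ⟨by omega, by omega, this.2.2.1, this.2.2.2⟩
      · rw [if_neg hc]
        rw [hgd] at hc
        rw [not_lt] at hc
        have := ih lo ((lo + hi) / 2) (by omega) (by omega) (by omega) hlo
          (fun j hj hjge => le_trans hc (mono ((lo + hi) / 2) j hj hjge))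
        exact ⟨this.1, by omega, this.2.2.1, this.2.2.2⟩
    · rw [dif_neg h]
      have : lo = hi := by omega
      subst this
      exact ⟨le_refl _, le_refl _, hlo, hhi⟩

-- per-flask: A's filter-and-min loss loop equals B's sorted+bisect loss loop
theorem pvLoss_eq (marks : List Int) (hne : marks ≠ []) :
    ∀ (reqs : List Int) (acc : Int),
      pvCalcLossA marks reqs acc =
      pvLossB (PySem.List.sorted marks (fun x => x) false)
              (PySem.List.pyGetD marks (-1) 0) reqs acc := by
  intro reqs
  induction reqs with
  | nil => intro acc; rfl
  | cons req rest ih =>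
    intro acc
    rw [pvCalcLossA, pvLossB]
    by_cases hc : PySem.List.pyGetD marks (-1) 0 < req
    · rw [if_pos hc, if_pos hc]
    · rw [if_neg hc, if_neg hc, ih]
      -- the added loss terms agree: reduce to the two min-mark values
      congr 2
      set s := PySem.List.sorted marks (fun x => x) false with hsdef
      have hperm : s.Perm marks := PySem.List.sorted_perm _ _ _
      have hpw : s.Pairwise (fun a b : Int => a ≤ b) := PySem.List.sorted_pairwise _ _
      have hcap : PySem.List.pyGetD marks (-1) 0 = marks.getLast hne :=
        PySem.List.pyGetD_neg_one marks 0 hne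
      rw [not_lt] at hc
      have hcapmem : marks.getLast hne ∈ marks := List.getLast_mem hne
      have hreqcap : req ≤ marks.getLast hne := by rw [hcap] at hc; exact hc
      set r := pvBisect s req 0 s.length with hrdef
      have hspec := pvBisect_spec s.length s req hpw 0 s.length (by omega) (by omega)
        (le_refl _) (fun j hj h => by omega) (fun j hj h => by omega)
      have hrlen : r < s.length := by
        rcases Nat.lt_or_ge r s.length with h | h
        · exact h
        · exfalso
          have : marks.getLast hne ∈ s := hperm.mem_iff.2 hcapmem
          rcases List.mem_iff_getElem.1 this with ⟨j, hj, hje⟩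
          have := hspec.2.2.1 j hj (by omega)
          rw [hje] at this
          omega
      -- s[r] is the min of the filtered list
      have hsr_mem : s[r] ∈ marks := hperm.mem_iff.1 (List.getElem_mem hrlen)
      have hsr_ge : req ≤ s[r] := hspec.2.2.2 r hrlen (le_refl _)
      have hsr_filt : s[r] ∈ marks.filter (fun m => decide (req ≤ m)) :=
        List.mem_filter.2 ⟨hsr_mem, by simpa using hsr_ge⟩
      obtain ⟨m, hm⟩ : ∃ m, PySem.List.min? (marks.filter (fun m => decide (req ≤ m)))
          (fun x => x) = some m := by
        cases hq : PySem.List.min? (marks.filter (fun m => decide (req ≤ m))) (fun x => x) with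
        | none =>
          exfalso
          have := (PySem.List.min?_eq_none_iff _ _).1 hq
          rw [this] at hsr_filt
          simp at hsr_filt
        | some m => exact ⟨m, rfl⟩
      have hmmem := PySem.List.min?_mem hm
      have hmmin := PySem.List.min?_isMin hm
      have h1 : m ≤ s[r] := hmmin _ hsr_filt
      have h2 : s[r] ≤ m := by
        have hmmarks : m ∈ marks := (List.mem_filter.1 hmmem).1
        have hmreq : req ≤ m := by
          have := (List.mem_filter.1 hmmem).2; simpa using this
        have : m ∈ s := hperm.mem_iff.2 hmmarks
        rcases List.mem_iff_getElem.1 this with ⟨j, hj, hje⟩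
        have hjr : r ≤ j := by
          rcases Nat.lt_or_ge j r with h | h
          · exfalso
            have := hspec.2.2.1 j hj h
            rw [hje] at this
            omega
          · exact h
        have : s[r] ≤ s[j] := pvPairwise_mono s hpw r j hj hjr
        rw [hje] at this
        exact this
      have hmin : (PySem.List.min? (marks.filter (fun m => decide (req ≤ m)))
          (fun x => x)).getD 0 = s[r] := by
        rw [hm]
        simp only [Option.getD_some]
        omega
      have hget : PySem.List.pyGetD s ((r : Nat) : Int) 0 = s[r] := by
        rw [PySem.List.pyGetD_natCast]
        exact List.getD_eq_getElem s 0 hrlen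
      rw [hmin, hget]

-- the two selection folds agree item by item
theorem choose_flask_spec : Claim_equal_choose_flask := by
  unfold Claim_equal_choose_flask Spec_choose_flask
  intro reqs markings _
  simp only [choose_flask, choose_flask_alt]
  rw [pvGroup_eq]
  have hnd := pvBuild_nodup markings
  have hnil := pvBuild_ne_nil markings
  refine congrArg Prod.fst ?_
  refine PySem.List.foldl_congr_mem _ _ _ _ ?_
  intro st fm hfm
  have hmem : (fm.1, fm.2) ∈ (pvBuildFlasksA markings).items := by simpa using hfm
  rw [PySem.Dict.getD_of_mem_items _ hmem hnd, pvLoss_eq fm.2 (hnil fm hfm) reqs 0]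
  obtain ⟨b1, b2⟩ := st
  cases hL : pvLossB (PySem.List.sorted fm.2 (fun x => x) false)
      (PySem.List.pyGetD fm.2 (-1) 0) reqs 0 with
  | none => simp [pvLtInf]
  | some l => cases b2 <;> simp [pvLtInf]
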